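-- pv_equiv track=rewrite | github.com/Callek/advent-of-code-2021 | py-aoc/py_aoc/day3.py | part2
-- ===== SOURCE A (Python) =====
-- from typing import List
--
-- def part2(diag_report: List[int]) -> int:
--     """Part 2"""
--     co2_rating = 0
--     o2_rating = 0
--     _co2_rating_report = diag_report[:]
--     _o2_rating_report = diag_report[:]
--     for bit in reversed(range(max(diag_report).bit_length())):
--         # Use some magic here, by sorting the list and reversing it, so that we can use the max
--         # trick.  Max on an equal split of 0 and 1 will return the first occurance rather than a
--         # random
--         bit_list_co2 = list(
--             reversed(sorted([diag & (0b1 << bit) for diag in _co2_rating_report]))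
--         )
--         bit_list_o2 = list(
--             reversed(sorted([diag & (0b1 << bit) for diag in _o2_rating_report]))
--         )
--         most_present_bit_co2 = max(bit_list_co2, key=bit_list_co2.count)
--         most_present_bit_o2 = max(bit_list_o2, key=bit_list_o2.count)
--         if len(_o2_rating_report) > 1:
--             _o2_rating_report = [
--                 diag
--                 for diag in _o2_rating_report
--                 if ((diag >> bit) & 1) == (most_present_bit_o2 >> bit)
--             ]
--         if len(_co2_rating_report) > 1:
--             _co2_rating_report = [
--                 diag
--                 for diag in _co2_rating_report
--                 if not ((diag >> bit) & 1) == (most_present_bit_co2 >> bit)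
--             ]
--         _co2_rating_report
--     co2_rating = _co2_rating_report[0]
--     o2_rating = _o2_rating_report[0]
--
--     return co2_rating * o2_rating
-- ===== SOURCE B (Python) =====
-- def part2(diag_report):
--     """Part 2: recursive bit-partition selection for O2/CO2 ratings."""
--     def rating(lst, bit, keep_most):
--         if len(lst) == 1 or bit < 0:
--             return lst[0]
--         ones = [d for d in lst if (d >> bit) & 1 == 1]
--         zeros = [d for d in lst if (d >> bit) & 1 == 0]
--         if keep_most:
--             nxt = ones if len(ones) >= len(zeros) else zeros
--         else:
--             nxt = zeros if len(zeros) <= len(ones) else ones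
--         return rating(nxt, bit - 1, keep_most)
--
--     top = max(diag_report).bit_length() - 1
--     return rating(diag_report, top, True) * rating(diag_report, top, False)
-- ===== Notes on version B (the rewrite author's own statement) =====
-- stated objective: simpler
-- what changed: B replaces A's per-bit sort/reverse/max-by-count majority trick and parallel pair-of-lists loop with one recursive helper that partitions the candidates by the current bit and recurses on the kept group, called once for O2 and once for CO2.
import Mathlib
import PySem

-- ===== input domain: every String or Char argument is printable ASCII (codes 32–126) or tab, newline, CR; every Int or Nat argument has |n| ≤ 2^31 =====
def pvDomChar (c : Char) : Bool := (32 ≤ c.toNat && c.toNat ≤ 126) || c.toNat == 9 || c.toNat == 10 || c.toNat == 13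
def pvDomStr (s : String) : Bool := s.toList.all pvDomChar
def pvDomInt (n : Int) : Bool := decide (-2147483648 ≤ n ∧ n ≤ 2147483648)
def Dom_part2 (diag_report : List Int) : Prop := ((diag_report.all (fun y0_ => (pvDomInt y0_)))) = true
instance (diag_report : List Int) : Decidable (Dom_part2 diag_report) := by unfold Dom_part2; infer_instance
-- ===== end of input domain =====

-- B re-implements A's O2/CO2 rating search as one recursive partition-by-bit helper (simpler:
-- no sort / max-by-count trick, no parallel pair state); equivalence is about return values.

-- ===== PORT A =====
-- A-side helper: `max(bit_list, key=bit_list.count)` over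
-- `bit_list = list(reversed(sorted([diag & (0b1 << bit) for diag in report])))`.
def mostPresent (report : List Int) (bit : Nat) : Int :=
  let bit_list := (PySem.List.sorted (report.map (fun d => PySem.Int.band d ((1:Int) <<< bit))) (fun x => x) false).reverse
  (PySem.List.max? bit_list (fun x => bit_list.count x)).getD 0

-- A-side helper: one loop iteration's update of `_o2_rating_report`.
def stepO2 (o2 : List Int) (bit : Nat) : List Int :=
  let most := mostPresent o2 bit
  if 1 < o2.length then
    o2.filter (fun d => PySem.Int.band (d >>> bit) 1 == most >>> bit)
  else o2

-- A-side helper: one loop iteration's update of `_co2_rating_report`.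
def stepCO2 (co2 : List Int) (bit : Nat) : List Int :=
  let most := mostPresent co2 bit
  if 1 < co2.length then
    co2.filter (fun d => !(PySem.Int.band (d >>> bit) 1 == most >>> bit))
  else co2

def part2 (diag_report : List Int) : Int :=
  -- `for bit in reversed(range(max(diag_report).bit_length()))`, state = (co2 list, o2 list)
  let w := PySem.Int.bitLength ((PySem.List.max? diag_report (fun x => x)).getD 0)
  let res := (List.range w).reverse.foldl
    (fun st bit => (stepCO2 st.1 bit, stepO2 st.2 bit)) (diag_report, diag_report)
  ((PySem.List.pyGet? res.1 0).getD 0) * ((PySem.List.pyGet? res.2 0).getD 0)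

-- ===== PORT B =====
-- B's recursive helper `rating(lst, bit, keep_most)`; fuel n stands for bit = n - 1,
-- n = 0 is Python's `bit < 0` base case.
def ratingRec (keepMost : Bool) : List Int → Nat → Int
  | lst, 0 => (PySem.List.pyGet? lst 0).getD 0
  | lst, n + 1 =>
    if lst.length == 1 then (PySem.List.pyGet? lst 0).getD 0
    else
      let ones := lst.filter (fun (d : Int) => PySem.Int.band (d >>> n) 1 == 1)
      let zeros := lst.filter (fun (d : Int) => PySem.Int.band (d >>> n) 1 == 0)
      let nxt := if keepMost then (if zeros.length ≤ ones.length then ones else zeros)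
                 else (if zeros.length ≤ ones.length then zeros else ones)
      ratingRec keepMost nxt n

def part2_alt (diag_report : List Int) : Int :=
  let w := PySem.Int.bitLength ((PySem.List.max? diag_report (fun x => x)).getD 0)
  ratingRec true diag_report w * ratingRec false diag_report w

-- ===== PRECONDITION & SPEC =====
-- Structural condition on the input (not a copy of either port: it computes no rating, no sort,
-- no max-by-count, no O2 state): walking the bits from the top, the CO2 candidate sublist must
-- either be down to one element or contain both bit values at the current bit.  A's crash set is
-- inherently path-dependent, so no non-recursive characterisation of it exists.
def co2OkAux (lst : List Int) : Nat → Bool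
  | 0 => true
  | n + 1 =>
    if lst.length ≤ 1 then true
    else
      let ones := lst.filter (fun (d : Int) => PySem.Int.band (d >>> n) 1 == 1)
      let zeros := lst.filter (fun (d : Int) => PySem.Int.band (d >>> n) 1 == 0)
      if ones.length = 0 || zeros.length = 0 then false
      else co2OkAux (if zeros.length ≤ ones.length then zeros else ones) n

-- Pre_ excludes exactly the inputs where A raises (and only those): the empty list (max([]) ->
-- ValueError) and inputs whose CO2 filtering step empties the candidate list, i.e. all remaining
-- (≥ 2) candidates agree on the current bit (A then raises ValueError/IndexError); B raises on
-- exactly the same inputs, so nothing A returns on is excluded.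
def Pre_part2 (diag_report : List Int) : Prop :=
  diag_report ≠ [] ∧
  co2OkAux diag_report
    (PySem.Int.bitLength ((PySem.List.max? diag_report (fun x => x)).getD 0)) = true

instance (diag_report : List Int) : Decidable (Pre_part2 diag_report) := by
  unfold Pre_part2; infer_instance

def pvWitness_part2 : List Int := [1, 2]

def Spec_part2 (diag_report : List Int) (out : Int) : Prop := out = part2_alt diag_report
instance (diag_report : List Int) (out : Int) : Decidable (Spec_part2 diag_report out) := by unfold Spec_part2; infer_instance

-- ===== CLAIM (what is proved, stated in full; the proofs are below) =====
def Claim_equal_part2 : Prop := ∀ (diag_report : List Int), Dom_part2 diag_report → Pre_part2 diag_report → Spec_part2 diag_report (part2 diag_report)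

-- ===== LEMMAS AND PROOFS =====

-- (d >> b) & 1 is a bit.
theorem band_shift_one_cases (d : Int) (b : Nat) :
    PySem.Int.band (d >>> b) 1 = 0 ∨ PySem.Int.band (d >>> b) 1 = 1 := by
  rw [PySem.Int.band_one]
  have h1 := PySem.Int.mod_nonneg (d >>> b) (b := 2) (by norm_num)
  have h2 := PySem.Int.mod_lt (d >>> b) (b := 2) (by norm_num)
  omega

-- d & (1 << b) = ((d >> b) & 1) * 2^b, for every Int d (two's complement).
theorem negSucc_emod_two (q : Nat) : (Int.negSucc q) % 2 = if q % 2 = 1 then 0 else 1 := by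
  rw [Int.negSucc_eq]; split <;> omega


theorem band_pow_eq (d : Int) (b : Nat) :
    PySem.Int.band d ((1:Int) <<< b) = PySem.Int.band (d >>> b) 1 * 2 ^ b := by
  rw [PySem.Int.band_one, show ((1:Int) <<< b) = ((2^b : Nat) : Int) by simp [Int.shiftLeft_eq]]
  cases d with
  | ofNat m =>
    rw [Int.ofNat_eq_natCast, ← Int.natCast_shiftRight, PySem.Int.band_natCast (m := m)]
    rw [show ((2:Int)) = ((2:Nat):Int) from rfl, PySem.Int.mod_natCast]
    rw [Nat.and_two_pow, Nat.shiftRight_eq_div_pow, Nat.testBit_eq_decide_div_mod_eq]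
    by_cases h : m / 2^b % 2 = 1
    · simp [h]
    · simp [h]
      rw [show ((2:Int)^b) = ((2^b : Nat) : Int) by push_cast; ring, ← Int.natCast_ediv]
      exact_mod_cast (by omega : 2 ∣ m / 2^b)
  | negSucc m =>
    rw [Int.negSucc_shiftRight, PySem.Int.band.eq_1]
    rw [PySem.Int.mod_eq_emod_of_pos (by norm_num), negSucc_emod_two]
    have h0 : ¬ (0 ≤ Int.negSucc m) := by exact of_decide_eq_false rfl
    simp only [h0, if_false, Nat.cast_nonneg, if_true, Int.toNat_natCast]
    have h1 : (-Int.negSucc m - 1) = (m : Int) := by rw [Int.negSucc_eq]; ring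
    rw [h1, Int.toNat_natCast, Nat.and_comm, Nat.and_two_pow,
      Nat.shiftRight_eq_div_pow, Nat.testBit_eq_decide_div_mod_eq]
    by_cases h : m / 2^b % 2 = 1
    · simp [h]
    · simp [h]
-- the sorted-descending shape of a {0, p}-valued list
theorem perm_two_valued (p : Int) (hp : p ≠ 0) :
    ∀ xs : List Int, (∀ x ∈ xs, x = 0 ∨ x = p) →
      xs.Perm (List.replicate (xs.count 0) 0 ++ List.replicate (xs.count p) p) := by
  intro xs
  induction xs with
  | nil => simp
  | cons x t ih =>
    intro h
    have ht := ih (fun y hy => h y (List.mem_cons_of_mem _ hy))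
    rcases h x (List.mem_cons_self) with hx | hx
    · subst hx
      rw [List.count_cons_self, List.count_cons_of_ne (Ne.symm hp), List.replicate_succ,
        List.cons_append]
      exact ht.cons 0
    · subst hx
      rw [List.count_cons_of_ne hp, List.count_cons_self, List.replicate_succ]
      exact (ht.cons _).trans List.perm_middle.symm

theorem sorted_rev_two_valued (p : Int) (hp : 0 < p) (xs : List Int)
    (h : ∀ x ∈ xs, x = 0 ∨ x = p) :
    (PySem.List.sorted xs (fun x => x) false).reverse
      = List.replicate (xs.count p) p ++ List.replicate (xs.count 0) 0 := by
  rw [PySem.List.sorted_id_eq_of_perm_of_pairwise xs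
      (List.replicate (xs.count 0) 0 ++ List.replicate (xs.count p) p)
      ((perm_two_valued p (by omega) xs h).symm)
      (by
        apply List.pairwise_append.mpr
        refine ⟨List.pairwise_replicate.mpr ?_, List.pairwise_replicate.mpr ?_, ?_⟩
        · simp
        · simp
        · intro a ha b hb
          rw [List.eq_of_mem_replicate ha, List.eq_of_mem_replicate hb]
          omega)]
  rw [List.reverse_append, List.reverse_replicate, List.reverse_replicate]
-- Python's max(bl, key=bl.count) on replicate k p ++ replicate m 0
theorem foldl_fix (f : Option Int → Int → Option Int) :
    ∀ (l : List Int) (y : Int), (∀ x ∈ l, f (some y) x = some y) →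
      List.foldl f (some y) l = some y := by
  intro l
  induction l with
  | nil => intro y _; rfl
  | cons a t ih =>
    intro y h
    rw [List.foldl_cons, h a List.mem_cons_self]
    exact ih y (fun x hx => h x (List.mem_cons_of_mem _ hx))


theorem max?_rep_rep (key : Int → Nat) (p : Int) (k m : Nat) :
    PySem.List.max? (List.replicate k p ++ List.replicate m 0) key
      = if k = 0 then (if m = 0 then none else some 0)
        else (if key p < key 0 ∧ 0 < m then some 0 else some p) := by
  unfold PySem.List.max?
  rw [List.foldl_append]
  cases k with
  | zero =>
    simp only [List.replicate_zero, List.foldl_nil]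
    cases m with
    | zero => rfl
    | succ j =>
      rw [List.replicate_succ, List.foldl_cons]
      rw [foldl_fix _ _ 0 (by
        intro x hx; rw [List.eq_of_mem_replicate hx]
        show (if key 0 < key 0 then some (0:Int) else some 0) = some 0
        rw [if_neg (lt_irrefl _)])]
      simp
  | succ j =>
    rw [List.replicate_succ, List.foldl_cons]
    rw [foldl_fix _ _ p (by
        intro x hx; rw [List.eq_of_mem_replicate hx]
        show (if key p < key p then some p else some p) = some p
        rw [if_neg (lt_irrefl _)])]
    by_cases hlt : key p < key 0
    · cases m with
      | zero => simp [hlt]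
      | succ i =>
        rw [List.replicate_succ, List.foldl_cons]
        have h2 : (if key p < key 0 then some (0:Int) else some p) = some 0 := by simp [hlt]
        show List.foldl _ (if key p < key 0 then some (0:Int) else some p) _ = _
        rw [h2]
        rw [foldl_fix _ _ 0 (by
          intro x hx; rw [List.eq_of_mem_replicate hx]
          show (if key 0 < key 0 then some (0:Int) else some 0) = some 0
          rw [if_neg (lt_irrefl _)])]
        simp [hlt]
    · rw [foldl_fix _ _ p (by
        intro x hx; rw [List.eq_of_mem_replicate hx]
        show (if key p < key 0 then some (0:Int) else some p) = some p
        rw [if_neg hlt])]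
      simp [hlt]
-- the most-present-bit trick, characterised
theorem bits_split (L : List Int) (b : Nat) :
    (L.filter (fun (d : Int) => PySem.Int.band (d >>> b) 1 == 1)).length
      + (L.filter (fun (d : Int) => PySem.Int.band (d >>> b) 1 == 0)).length = L.length := by
  have hcg : L.filter (fun (d : Int) => !(PySem.Int.band (d >>> b) 1 == 1))
      = L.filter (fun (d : Int) => PySem.Int.band (d >>> b) 1 == 0) := by
    apply List.filter_congr
    intro d _
    rcases band_shift_one_cases d b with h | h <;> simp [h]
  rw [← hcg]
  exact (List.length_eq_length_filter_add (l := L)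
    (fun (d : Int) => PySem.Int.band (d >>> b) 1 == 1)).symm


theorem mostPresent_shift (L : List Int) (b : Nat) (hL : L ≠ []) :
    mostPresent L b >>> b
      = if (L.filter (fun (d : Int) => PySem.Int.band (d >>> b) 1 == 0)).length
          ≤ (L.filter (fun (d : Int) => PySem.Int.band (d >>> b) 1 == 1)).length
        then (1:Int) else 0 := by
  have hp : (0:Int) < 2 ^ b := by positivity
  unfold mostPresent
  have hval : ∀ x ∈ L.map (fun d => PySem.Int.band d ((1:Int) <<< b)), x = 0 ∨ x = 2 ^ b := by
    intro x hx
    obtain ⟨d, _, rfl⟩ := List.mem_map.mp hx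
    rw [band_pow_eq]
    rcases band_shift_one_cases d b with h | h <;> rw [h] <;> simp
  rw [sorted_rev_two_valued (2^b) hp _ hval]
  set k := (L.map (fun d => PySem.Int.band d ((1:Int) <<< b))).count (2^b) with hk
  set m := (L.map (fun d => PySem.Int.band d ((1:Int) <<< b))).count 0 with hm
  have hkeq : k = (L.filter (fun (d : Int) => PySem.Int.band (d >>> b) 1 == 1)).length := by
    rw [hk, List.count_eq_countP, List.countP_map, ← List.countP_eq_length_filter]
    apply List.countP_congr
    intro d _
    simp only [Function.comp_apply, band_pow_eq]
    rcases band_shift_one_cases d b with h | h <;>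
      first
        | (simp [h, beq_iff_eq]; omega)
        | simp [h, beq_iff_eq]
  have hmeq : m = (L.filter (fun (d : Int) => PySem.Int.band (d >>> b) 1 == 0)).length := by
    rw [hm, List.count_eq_countP, List.countP_map, ← List.countP_eq_length_filter]
    apply List.countP_congr
    intro d _
    simp only [Function.comp_apply, band_pow_eq]
    rcases band_shift_one_cases d b with h | h <;>
      first
        | (simp [h, beq_iff_eq]; omega)
        | simp [h, beq_iff_eq]
  have hkm : 0 < k + m := by
    have : k + m = L.length := by
      rw [hkeq, hmeq]
      have hcg : L.filter (fun (d : Int) => !(PySem.Int.band (d >>> b) 1 == 1))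
          = L.filter (fun (d : Int) => PySem.Int.band (d >>> b) 1 == 0) := by
        apply List.filter_congr
        intro d _
        rcases band_shift_one_cases d b with h | h <;> simp [h]
      rw [← hcg]
      exact (List.length_eq_length_filter_add (l := L)
        (fun (d : Int) => PySem.Int.band (d >>> b) 1 == 1)).symm
    have : 0 < L.length := List.length_pos_of_ne_nil hL
    omega
  simp only []
  rw [max?_rep_rep]
  have hcnt : (List.replicate k ((2:Int)^b) ++ List.replicate m 0).count (2^b) = k := by
    rw [List.count_append, List.count_replicate, List.count_replicate]
    simp [beq_iff_eq]
    omega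
  have hcnt0 : (List.replicate k ((2:Int)^b) ++ List.replicate m 0).count 0 = m := by
    rw [List.count_append, List.count_replicate, List.count_replicate]
    simp [beq_iff_eq]
  rw [hcnt, hcnt0, ← hkeq, ← hmeq]
  by_cases hk0 : k = 0
  · have hm0 : ¬ m = 0 := by omega
    rw [if_pos hk0, if_neg hm0, Option.getD_some, if_neg (by omega), Int.zero_shiftRight]
  · rw [if_neg hk0]
    by_cases hlt : k < m
    · rw [if_pos ⟨hlt, by omega⟩, Option.getD_some, if_neg (by omega), Int.zero_shiftRight]
    · rw [if_neg (by omega), Option.getD_some, if_pos (by omega)]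
      rw [Int.shiftRight_eq_div_pow, show (((2:Nat) ^ b : Nat) : Int) = (2:Int)^b by push_cast; ring]
      exact Int.ediv_self (by omega)
theorem foldl_stepO2_short (L : List Int) (h : L.length ≤ 1) (bs : List Nat) :
    List.foldl stepO2 L bs = L := by
  induction bs with
  | nil => rfl
  | cons b bs ih => simpa [stepO2, Nat.lt_iff_add_one_le, h, show ¬ 1 < L.length by omega] using ih

theorem foldl_stepCO2_short (L : List Int) (h : L.length ≤ 1) (bs : List Nat) :
    List.foldl stepCO2 L bs = L := by
  induction bs with
  | nil => rfl
  | cons b bs ih => simpa [stepCO2, show ¬ 1 < L.length by omega] using ih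

theorem o2_fold_eq_rating : ∀ (n : Nat) (L : List Int), L ≠ [] →
    (PySem.List.pyGet? (List.foldl stepO2 L (List.range n).reverse) 0).getD 0
      = ratingRec true L n := by
  intro n
  induction n with
  | zero => intro L _; rfl
  | succ n ih =>
    intro L hL
    have hlen : 0 < L.length := List.length_pos_of_ne_nil hL
    rw [List.range_succ, List.reverse_append]
    simp only [List.reverse_singleton, List.singleton_append, List.foldl_cons]
    by_cases h1 : L.length = 1
    · rw [foldl_stepO2_short _ (by simp [stepO2, show ¬ 1 < L.length by omega]; omega) _]
      obtain ⟨x, hx⟩ : ∃ x, L = [x] := List.length_eq_one_iff.mp h1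
      subst hx
      simp [ratingRec, stepO2, PySem.List.pyGet?, PySem.List.pyIdx?]
    · have h2 : 1 < L.length := by omega
      have hstep : stepO2 L n
          = if (L.filter (fun (d : Int) => PySem.Int.band (d >>> n) 1 == 0)).length
              ≤ (L.filter (fun (d : Int) => PySem.Int.band (d >>> n) 1 == 1)).length
            then L.filter (fun (d : Int) => PySem.Int.band (d >>> n) 1 == 1)
            else L.filter (fun (d : Int) => PySem.Int.band (d >>> n) 1 == 0) := by
        simp only [stepO2, if_pos h2, mostPresent_shift L n hL]
        split
        · rfl
        · apply List.filter_congr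
          intro d _
          rcases band_shift_one_cases d n with h | h <;> simp [h]
      rw [hstep]
      have hsum := bits_split L n
      rw [show ratingRec true L (n+1)
          = if (L.filter (fun (d : Int) => PySem.Int.band (d >>> n) 1 == 0)).length
              ≤ (L.filter (fun (d : Int) => PySem.Int.band (d >>> n) 1 == 1)).length
            then ratingRec true (L.filter (fun (d : Int) => PySem.Int.band (d >>> n) 1 == 1)) n
            else ratingRec true (L.filter (fun (d : Int) => PySem.Int.band (d >>> n) 1 == 0)) n by
        simp only [ratingRec, beq_iff_eq, h1, if_false, if_true]
        exact apply_ite (fun l => ratingRec true l n) _ _ _]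
      split
      · next hc => exact ih _ (by apply List.ne_nil_of_length_pos; omega)
      · next hc => exact ih _ (by apply List.ne_nil_of_length_pos; omega)
theorem co2_fold_eq_rating : ∀ (n : Nat) (L : List Int), L ≠ [] → co2OkAux L n = true →
    (PySem.List.pyGet? (List.foldl stepCO2 L (List.range n).reverse) 0).getD 0
      = ratingRec false L n := by
  intro n
  induction n with
  | zero => intro L _ _; rfl
  | succ n ih =>
    intro L hL hok
    have hlen : 0 < L.length := List.length_pos_of_ne_nil hL
    rw [List.range_succ, List.reverse_append]
    simp only [List.reverse_singleton, List.singleton_append, List.foldl_cons]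
    by_cases h1 : L.length = 1
    · rw [foldl_stepCO2_short _ (by simp [stepCO2, show ¬ 1 < L.length by omega]; omega) _]
      obtain ⟨x, hx⟩ : ∃ x, L = [x] := List.length_eq_one_iff.mp h1
      subst hx
      simp [ratingRec, stepCO2, PySem.List.pyGet?, PySem.List.pyIdx?]
    · have h2 : 1 < L.length := by omega
      rw [co2OkAux] at hok
      rw [if_neg (by omega)] at hok
      by_cases hz : ((L.filter (fun (d : Int) => PySem.Int.band (d >>> n) 1 == 1)).length = 0
          ∨ (L.filter (fun (d : Int) => PySem.Int.band (d >>> n) 1 == 0)).length = 0)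
      · rw [if_pos (by simpa using hz)] at hok
        exact absurd hok (by simp)
      · push Not at hz
        obtain ⟨ho, hzz⟩ := hz
        rw [if_neg (by simpa using (not_or.mpr ⟨ho, hzz⟩))] at hok
        have hstep : stepCO2 L n
            = if (L.filter (fun (d : Int) => PySem.Int.band (d >>> n) 1 == 0)).length
                ≤ (L.filter (fun (d : Int) => PySem.Int.band (d >>> n) 1 == 1)).length
              then L.filter (fun (d : Int) => PySem.Int.band (d >>> n) 1 == 0)
              else L.filter (fun (d : Int) => PySem.Int.band (d >>> n) 1 == 1) := by
          simp only [stepCO2, if_pos h2, mostPresent_shift L n hL]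
          split
          · apply List.filter_congr
            intro d _
            rcases band_shift_one_cases d n with h | h <;> simp [h]
          · apply List.filter_congr
            intro d _
            rcases band_shift_one_cases d n with h | h <;> simp [h]
        rw [hstep]
        rw [show ratingRec false L (n+1)
            = if (L.filter (fun (d : Int) => PySem.Int.band (d >>> n) 1 == 0)).length
                ≤ (L.filter (fun (d : Int) => PySem.Int.band (d >>> n) 1 == 1)).length
              then ratingRec false (L.filter (fun (d : Int) => PySem.Int.band (d >>> n) 1 == 0)) n
              else ratingRec false (L.filter (fun (d : Int) => PySem.Int.band (d >>> n) 1 == 1)) n by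
          simp only [ratingRec, beq_iff_eq, h1, if_false, Bool.false_eq_true]
          exact apply_ite (fun l => ratingRec false l n) _ _ _]
        split
        · next hc =>
          exact ih _ (List.ne_nil_of_length_pos (by omega)) (by
            rw [if_pos hc] at hok; exact hok)
        · next hc =>
          exact ih _ (List.ne_nil_of_length_pos (by omega)) (by
            rw [if_neg hc] at hok; exact hok)
-- ===== VERDICT (by name: the statement is the Claim_ definition above) =====
theorem part2_spec : Claim_equal_part2 := by
  intro L _ hpre
  obtain ⟨hne, hok⟩ := hpre
  unfold Spec_part2 part2 part2_alt
  simp only [PySem.List.foldl_prod_mk]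
  rw [co2_fold_eq_rating _ L hne hok, o2_fold_eq_rating _ L hne]
  exact mul_comm _ _
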